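-- pv_equiv track=rewrite | github.com/struggling-student/PythonExercises | Eserciziario/5/solution.py | recEs5
-- ===== SOURCE A (Python) =====
-- def recEs5(insOrig, insResult, k):
--     if(k == 1):
--         return insResult
--     else:
--         nuovoInsieme = set()
--         for el1 in insOrig:
--             for el2 in insResult:
--                 nuovoInsieme.add(el1+el2)
--         return recEs5(insOrig, nuovoInsieme, k-1)
-- ===== SOURCE B (Python) =====
-- def recEs5(insOrig, insResult, k):
--     cur = insResult
--     for _ in range(k - 1):
--         cur = {el1 + el2 for el1 in insOrig for el2 in cur}
--     return cur
-- ===== Notes on version B (the rewrite author's own statement) =====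
-- stated objective: simpler
-- what changed: A's recursion (one call per round, each mutating a fresh set through two nested insertion loops) becomes a single iterative loop whose body is one set comprehension per round; the k==1 base case disappears into the empty range.
import Mathlib
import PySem

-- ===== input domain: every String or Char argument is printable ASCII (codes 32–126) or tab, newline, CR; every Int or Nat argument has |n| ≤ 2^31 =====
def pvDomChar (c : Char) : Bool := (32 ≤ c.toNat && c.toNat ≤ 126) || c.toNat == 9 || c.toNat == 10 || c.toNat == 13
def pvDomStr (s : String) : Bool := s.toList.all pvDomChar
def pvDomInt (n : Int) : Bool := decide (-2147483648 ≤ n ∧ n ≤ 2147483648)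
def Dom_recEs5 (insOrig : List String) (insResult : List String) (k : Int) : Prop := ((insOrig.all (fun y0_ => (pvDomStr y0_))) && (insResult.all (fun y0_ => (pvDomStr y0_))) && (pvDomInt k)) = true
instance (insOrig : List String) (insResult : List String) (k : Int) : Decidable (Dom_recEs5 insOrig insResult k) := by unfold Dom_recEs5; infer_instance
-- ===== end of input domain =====

-- B replaces A's recursion with mutating nested insertion loops by a plain iterative loop whose body is
-- one set comprehension per round (simpler: shorter and flatter, no recursion, no manual set mutation).

-- ===== PORT A =====
def recEs5 (insOrig : List String) (insResult : List String) (k : Int) : List String :=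
  if k = 1 then insResult
  else if k < 1 then insResult
    -- ^ totality guard only: for k < 1 the Python recurses without a base case (RecursionError);
    --   these inputs are outside Pre_recEs5, nothing is claimed there.
  else
    recEs5 insOrig
      (insOrig.foldl (fun nuovoInsieme el1 =>
          insResult.foldl (fun nuovoInsieme el2 => PySem.Set.add nuovoInsieme (el1 ++ el2)) nuovoInsieme)
        PySem.Set.empty)
      (k - 1)
termination_by (k - 1).toNat
decreasing_by omega

-- ===== PORT B =====
def recEs5_alt (insOrig : List String) (insResult : List String) (k : Int) : List String :=
  (PySem.List.pyRange 0 (k - 1) 1).foldl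
    (fun cur _ => PySem.Set.ofList (insOrig.flatMap (fun el1 => cur.map (fun el2 => el1 ++ el2))))
    insResult

-- ===== PRECONDITION & SPEC =====
-- Pre_ excludes exactly k ≤ 0, where A recurses without a base case and raises RecursionError.
def Pre_recEs5 (insOrig : List String) (insResult : List String) (k : Int) : Prop := 1 ≤ k
instance (insOrig : List String) (insResult : List String) (k : Int) : Decidable (Pre_recEs5 insOrig insResult k) := by unfold Pre_recEs5; infer_instance

def pvWitness_recEs5 : List String × List String × Int := (["a"], ["b"], 2)

def Spec_recEs5 (insOrig : List String) (insResult : List String) (k : Int) (out : List String) : Prop := out = recEs5_alt insOrig insResult k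
instance (insOrig : List String) (insResult : List String) (k : Int) (out : List String) : Decidable (Spec_recEs5 insOrig insResult k out) := by unfold Spec_recEs5; infer_instance

-- ===== CLAIM (what is proved, stated in full; the proofs are below) =====
def Claim_equal_recEs5 : Prop := ∀ (insOrig : List String) (insResult : List String) (k : Int), Dom_recEs5 insOrig insResult k → Pre_recEs5 insOrig insResult k → Spec_recEs5 insOrig insResult k (recEs5 insOrig insResult k)

-- ===== LEMMAS AND PROOFS =====

-- the flat list of all concatenations el1 ++ el2, el1 from orig (outer), el2 from res (inner)
def segs (orig res : List String) : List String := orig.flatMap (fun el1 => res.map (fun el2 => el1 ++ el2))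

-- one round: the distinct concatenations in first-insertion order
def stepD (orig res : List String) : List String := PySem.Set.ofList (segs orig res)

-- A's nested insertion loops over insOrig × insResult build exactly one stepD round
theorem foldl_update_eq (res : List String) (orig : List String) (acc : List String) :
    orig.foldl (fun acc o => PySem.Set.update acc (res.map (fun s => o ++ s))) acc
      = PySem.Set.update acc (segs orig res) := by
  induction orig generalizing acc with
  | nil => simp [segs]
  | cons o orig ih =>
    rw [List.foldl_cons, ih]
    unfold segs
    rw [List.flatMap_cons, PySem.Set.update_append]

theorem stepA_eq (orig res : List String) :
    orig.foldl (fun nuovoInsieme el1 =>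
        res.foldl (fun nuovoInsieme el2 => PySem.Set.add nuovoInsieme (el1 ++ el2)) nuovoInsieme)
      PySem.Set.empty = stepD orig res := by
  have hfold : orig.foldl (fun nuovoInsieme el1 =>
        res.foldl (fun nuovoInsieme el2 => PySem.Set.add nuovoInsieme (el1 ++ el2)) nuovoInsieme)
      PySem.Set.empty
      = orig.foldl (fun acc o => PySem.Set.update acc (res.map (fun s => o ++ s))) PySem.Set.empty := by
    congr 1
    funext acc o
    exact (PySem.Set.update_map_eq_foldl_add res (fun el2 => o ++ el2) acc).symm
  rw [hfold, foldl_update_eq res orig PySem.Set.empty]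
  rw [show (PySem.Set.empty : PySem.Set String) = ([] : List String) from rfl,
      PySem.Set.update_nil_left]
  rfl

-- A iterates stepD k-1 times
theorem recEs5_eq_iterate (orig : List String) :
    ∀ (n : Nat) (res : List String), recEs5 orig res ((n : Int) + 1) = (stepD orig)^[n] res := by
  intro n
  induction n with
  | zero => intro res; rw [recEs5]; simp
  | succ m ih =>
    intro res
    rw [recEs5]
    rw [if_neg (by omega), if_neg (by omega)]
    rw [stepA_eq, show ((m + 1 : Nat) : Int) + 1 - 1 = (m : Int) + 1 by push_cast; ring,
        ih (stepD orig res), Function.iterate_succ_apply]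

-- B's loop iterates stepD too, once per element of range(k-1)
theorem recEs5_alt_eq_iterate (orig res : List String) (n : Nat) :
    recEs5_alt orig res ((n : Int) + 1) = (stepD orig)^[n] res := by
  unfold recEs5_alt
  have hfun : (fun (cur : List String) (_ : Int) =>
      PySem.Set.ofList (orig.flatMap (fun el1 => cur.map (fun el2 => el1 ++ el2))))
      = (fun cur _ => stepD orig cur) := rfl
  rw [hfun, List.foldl_const]
  congr 1
  rw [PySem.List.length_pyRange_one]
  omega

-- ===== VERDICT (by name: the statement is the Claim_ definition above) =====
theorem recEs5_spec : Claim_equal_recEs5 := by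
  intro insOrig insResult k _ hPre
  unfold Spec_recEs5
  unfold Pre_recEs5 at hPre
  obtain ⟨n, hn⟩ : ∃ n : Nat, k = (n : Int) + 1 := ⟨(k - 1).toNat, by omega⟩
  subst hn
  rw [recEs5_eq_iterate, recEs5_alt_eq_iterate]
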